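-- pv_equiv track=rewrite | github.com/ASSERT-KTH/C4B_APR | data_directory/532_problem_id/12481_author_id/Rejected.py | f
-- ===== SOURCE A (Python) =====
-- MAX = 100005
--
-- def big_pow3(n):
--     l = 0; p = MAX
--     while p-l != 1:
--         mid = (p+l+1)//2
--         if (mid*mid*mid <= n):
--             l = mid
--         else:
--             p = mid
--     return l
--
-- def f(n):
--     if n < 8:
--         return [n, n]
--     a = big_pow3(n)
--     r1 = f(n-a**3)
--     r1 = [r1[0] + 1, r1[1] + a**3]
--     r2 = f(a**3-1)
--     return max(r1, r2)
-- ===== SOURCE B (Python) =====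
-- def f(n):
--     if n < 8:
--         return [n, n]
--
--     def cbrt(m):
--         a = 0
--         while (a + 1) ** 3 <= m:
--             a += 1
--         return a
--
--     memo = {}
--
--     def go(m):
--         if m < 8:
--             return [m, m]
--         if m in memo:
--             return memo[m]
--         a = cbrt(m)
--         c, s = go(m - a ** 3)
--         r1 = [c + 1, s + a ** 3]
--         r2 = go(a ** 3 - 1)
--         res = r2 if r2 > r1 else r1
--         memo[m] = res
--         return res
--
--     return go(n)
-- ===== Notes on version B (the rewrite author's own statement) =====
-- stated objective: faster
-- what changed: B memoizes the recursion on its argument with a dict (top-down DP over the overlapping subproblems) and replaces the fixed-bounds binary-search cube root by a simple incrementing integer cube-root loop, so each distinct argument is solved once instead of the exponentially re-branching recursion of A.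
import Mathlib
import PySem

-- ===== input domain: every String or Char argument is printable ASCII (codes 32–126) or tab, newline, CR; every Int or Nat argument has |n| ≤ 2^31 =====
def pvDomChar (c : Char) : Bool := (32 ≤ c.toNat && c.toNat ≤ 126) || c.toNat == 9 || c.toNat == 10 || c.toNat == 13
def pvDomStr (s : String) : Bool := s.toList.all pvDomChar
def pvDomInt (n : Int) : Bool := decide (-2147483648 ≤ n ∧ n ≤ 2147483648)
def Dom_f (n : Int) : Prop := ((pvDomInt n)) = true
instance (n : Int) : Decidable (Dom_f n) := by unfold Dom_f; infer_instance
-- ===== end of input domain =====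

-- B memoizes the recursion on its argument (top-down DP with a dict), so each distinct
-- argument is solved once instead of A's repeatedly re-branching recursion.

-- ===== PORT A =====
-- Python's `max(r1, r2)` on two lists: lexicographic, returns the first argument on ties.
-- Exact for lists of ints (hand-ported: PySem has no two-list lexicographic comparison).
def pyLexLt : List Int → List Int → Bool
  | [], [] => false
  | [], _ :: _ => true
  | _ :: _, [] => false
  | x :: xs, y :: ys => if x < y then true else if y < x then false else pyLexLt xs ys

-- the while-loop of big_pow3; fuel = initial gap p-l plus one (the gap strictly shrinks)
def bp3Loop : Nat → Int → Int → Int → Int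
  | 0, _, l, _ => l
  | fuel+1, n, l, p =>
    if p - l ≠ 1 then
      let mid := PySem.Int.floordiv (p + l + 1) 2
      if mid * mid * mid ≤ n then bp3Loop fuel n mid p else bp3Loop fuel n l mid
    else l

def big_pow3 (n : Int) : Int := bp3Loop 100006 n 0 100005

-- the recursion of f; fuel device only: the argument strictly decreases when n ≥ 8
-- (the recursive arguments are nonnegative and smaller), so n.toNat + 1 steps always suffice
def fLoop : Nat → Int → List Int
  | 0, n => [n, n]
  | fuel+1, n =>
    if n < 8 then [n, n]
    else
      let a := big_pow3 n
      let r0 := fLoop fuel (n - a ^ 3)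
      -- r1[0] / r1[1]: the recursive result always has two elements (pyGetD, index in range)
      let r1 := [PySem.List.pyGetD r0 0 0 + 1, PySem.List.pyGetD r0 1 0 + a ^ 3]
      let r2 := fLoop fuel (a ^ 3 - 1)
      if pyLexLt r1 r2 then r2 else r1

def f (n : Int) : List Int := fLoop (n.toNat + 1) n

-- ===== PORT B =====
-- the incrementing integer-cube-root loop of Source B's cbrt
def icbrtLoop (m a : Int) : Int :=
  if (a + 1) ^ 3 ≤ m then icbrtLoop m (a + 1) else a
termination_by (m - a ^ 3).toNat
decreasing_by
  have hc : a ^ 3 + 1 ≤ (a + 1) ^ 3 := by nlinarith [sq_nonneg (2 * a + 1)]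
  omega

-- memoized recursion of Source B's go: the memo dict is threaded through the calls;
-- same fuel device as fLoop (the argument strictly decreases, m.toNat + 1 steps suffice)
def goLoop : Nat → Int → PySem.Dict Int (List Int) → List Int × PySem.Dict Int (List Int)
  | 0, m, memo => ([m, m], memo)
  | fuel+1, m, memo =>
    if m < 8 then ([m, m], memo)
    else
      match memo.get? m with
      | some v => (v, memo)
      | none =>
        let a := icbrtLoop m 0
        let p1 := goLoop fuel (m - a ^ 3) memo
        let r1 := [PySem.List.pyGetD p1.1 0 0 + 1, PySem.List.pyGetD p1.1 1 0 + a ^ 3]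
        let p2 := goLoop fuel (a ^ 3 - 1) p1.2
        let res := if pyLexLt r1 p2.1 then p2.1 else r1
        (res, p2.2.insert m res)

def f_alt (n : Int) : List Int :=
  if n < 8 then [n, n]
  else (goLoop (n.toNat + 1) n PySem.Dict.empty).1

-- ===== PRECONDITION & SPEC =====
def Spec_f (n : Int) (out : List Int) : Prop := out = f_alt n
instance (n : Int) (out : List Int) : Decidable (Spec_f n out) := by unfold Spec_f; infer_instance

-- ===== CLAIM (what is proved, stated in full; the proofs are below) =====
def Claim_equal_f : Prop := ∀ (n : Int), Dom_f n → Spec_f n (f n)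

-- ===== LEMMAS AND PROOFS =====

-- invariant of A's binary search: the result is a nonnegative cube root lower bound,
-- and either it is exact (next cube exceeds n) or the search never moved its upper end
theorem bp3Loop_inv (fuel : Nat) : ∀ (n l p : Int), 0 ≤ l → l * l * l ≤ n → l < p →
    p - l ≤ (fuel : Int) → (n < p * p * p ∨ p = 100005) →
    l ≤ bp3Loop fuel n l p ∧
    bp3Loop fuel n l p * bp3Loop fuel n l p * bp3Loop fuel n l p ≤ n ∧
    (n < (bp3Loop fuel n l p + 1) * (bp3Loop fuel n l p + 1) * (bp3Loop fuel n l p + 1) ∨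
      bp3Loop fuel n l p = 100004) := by
  induction fuel with
  | zero => intro n l p h0 h3 hlp hfuel _; simp at hfuel; omega
  | succ fuel ih =>
    intro n l p h0 h3 hlp hfuel hdisj
    by_cases hpl : p - l = 1
    · simp only [bp3Loop, hpl, ne_eq, not_true_eq_false, if_false]
      refine ⟨le_refl l, h3, ?_⟩
      rcases hdisj with h | h
      · left; have : p = l + 1 := by omega
        rw [this] at h; exact h
      · right; omega
    · simp only [bp3Loop, ne_eq, hpl, not_false_eq_true, if_true]
      rw [PySem.Int.floordiv_eq_ediv_of_pos (by norm_num)]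
      have hm1 : l + 1 ≤ (p + l + 1) / 2 := by omega
      have hm2 : (p + l + 1) / 2 ≤ p - 1 := by omega
      by_cases hc : ((p + l + 1) / 2) * ((p + l + 1) / 2) * ((p + l + 1) / 2) ≤ n
      · simp only [hc, if_true]
        have h := ih n ((p + l + 1) / 2) p (by omega) hc (by omega) (by push_cast at hfuel ⊢; omega) hdisj
        exact ⟨by omega, h.2.1, h.2.2⟩
      · simp only [hc, if_false]
        exact ih n l ((p + l + 1) / 2) h0 h3 (by omega) (by push_cast at hfuel ⊢; omega)
          (Or.inl (by omega))

theorem big_pow3_inv (n : Int) (h0 : 0 ≤ n) :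
    0 ≤ big_pow3 n ∧ big_pow3 n * big_pow3 n * big_pow3 n ≤ n ∧
      (n < (big_pow3 n + 1) * (big_pow3 n + 1) * (big_pow3 n + 1) ∨ big_pow3 n = 100004) := by
  unfold big_pow3
  exact bp3Loop_inv 100006 n 0 100005 (le_refl 0) (by omega) (by norm_num) (by norm_num)
    (Or.inr rfl)

theorem big_pow3_ge_two (n : Int) (h8 : 8 ≤ n) :
    2 ≤ big_pow3 n ∧ big_pow3 n ^ 3 ≤ n := by
  obtain ⟨h1, h2, h3⟩ := big_pow3_inv n (by omega)
  have hcube : big_pow3 n ^ 3 = big_pow3 n * big_pow3 n * big_pow3 n := by ring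
  refine ⟨?_, by rw [hcube]; exact h2⟩
  rcases h3 with h | h
  · by_contra hlt
    have hr : big_pow3 n = 0 ∨ big_pow3 n = 1 := by omega
    rcases hr with hr | hr <;> rw [hr] at h <;> omega
  · omega

theorem icbrtLoop_inv (m : Int) : ∀ (a : Int), 0 ≤ a → a ^ 3 ≤ m →
    a ≤ icbrtLoop m a ∧ (icbrtLoop m a) ^ 3 ≤ m ∧ m < (icbrtLoop m a + 1) ^ 3 := by
  have key : ∀ (k : Nat) (a : Int), (m - a ^ 3).toNat ≤ k → 0 ≤ a → a ^ 3 ≤ m →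
      a ≤ icbrtLoop m a ∧ (icbrtLoop m a) ^ 3 ≤ m ∧ m < (icbrtLoop m a + 1) ^ 3 := by
    intro k
    induction k with
    | zero =>
      intro a hk ha h3
      have hc : a ^ 3 + 1 ≤ (a + 1) ^ 3 := by nlinarith [sq_nonneg (2 * a + 1)]
      have hlt : ¬ (a + 1) ^ 3 ≤ m := by omega
      rw [icbrtLoop, if_neg hlt]
      exact ⟨le_refl a, h3, by omega⟩
    | succ k ih =>
      intro a hk ha h3
      have hc : a ^ 3 + 1 ≤ (a + 1) ^ 3 := by nlinarith [sq_nonneg (2 * a + 1)]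
      by_cases hlt : (a + 1) ^ 3 ≤ m
      · rw [icbrtLoop, if_pos hlt]
        have h := ih (a + 1) (by omega) (by omega) hlt
        exact ⟨by omega, h.2.1, h.2.2⟩
      · rw [icbrtLoop, if_neg hlt]
        exact ⟨le_refl a, h3, by omega⟩
  intro a
  exact key (m - a ^ 3).toNat a (le_refl _)

theorem icbrt_ge_two (m : Int) (h8 : 8 ≤ m) :
    2 ≤ icbrtLoop m 0 ∧ (icbrtLoop m 0) ^ 3 ≤ m := by
  obtain ⟨h1, h2, h3⟩ := icbrtLoop_inv m 0 (le_refl 0) (by norm_num; omega)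
  refine ⟨?_, h2⟩
  by_contra hlt
  have hr : icbrtLoop m 0 = 0 ∨ icbrtLoop m 0 = 1 := by omega
  rcases hr with hr | hr <;> rw [hr] at h3 <;> norm_num at h3 <;> omega

-- both cube-root computations agree on the domain (n < 100005^3, far above 2^31)
theorem icbrt_eq_bp3 (n : Int) (h8 : 8 ≤ n) (hub : n ≤ 2147483648) :
    icbrtLoop n 0 = big_pow3 n := by
  obtain ⟨ha2, ha3, haub⟩ := icbrtLoop_inv n 0 (le_refl 0) (by norm_num; omega)
  obtain ⟨hb1, hb2, hb3⟩ := big_pow3_inv n (by omega)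
  have hbub : n < (big_pow3 n + 1) * (big_pow3 n + 1) * (big_pow3 n + 1) := by
    rcases hb3 with h | h
    · exact h
    · exfalso; rw [h] at hb2; norm_num at hb2; omega
  rcases lt_trichotomy (icbrtLoop n 0) (big_pow3 n) with h | h | h
  · exfalso
    have : (icbrtLoop n 0 + 1) ^ 3 ≤ big_pow3 n ^ 3 :=
      pow_le_pow_left₀ (by omega) (by omega) 3
    have hb2' : big_pow3 n ^ 3 ≤ n := by
      have : big_pow3 n ^ 3 = big_pow3 n * big_pow3 n * big_pow3 n := by ring
      rw [this]; exact hb2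
    omega
  · exact h
  · exfalso
    have : (big_pow3 n + 1) ^ 3 ≤ icbrtLoop n 0 ^ 3 :=
      pow_le_pow_left₀ (by omega) (by omega) 3
    have hbub' : n < (big_pow3 n + 1) ^ 3 := by
      have he : (big_pow3 n + 1) ^ 3 = (big_pow3 n + 1) * (big_pow3 n + 1) * (big_pow3 n + 1) := by
        ring
      rw [he]; exact hbub
    omega

-- the fuel of fLoop is irrelevant as long as it exceeds the argument
theorem fLoop_irrel : ∀ (fuel₁ : Nat), ∀ (fuel₂ : Nat) (m : Int), m.toNat < fuel₁ →
    m.toNat < fuel₂ → fLoop fuel₁ m = fLoop fuel₂ m := by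
  intro fuel₁
  induction fuel₁ with
  | zero => intro fuel₂ m h1 _; omega
  | succ fuel₁ ih =>
    intro fuel₂ m h1 h2
    obtain ⟨fuel₂', rfl⟩ : ∃ k, fuel₂ = k + 1 := ⟨fuel₂ - 1, by omega⟩
    by_cases hm : m < 8
    · simp only [fLoop, if_pos hm]
    · simp only [fLoop, if_neg hm]
      obtain ⟨ha2, ha3⟩ := big_pow3_ge_two m (by omega)
      have h8a : (2:Int) ^ 3 ≤ big_pow3 m ^ 3 := pow_le_pow_left₀ (by norm_num) ha2 3
      norm_num at h8a
      rw [ih fuel₂' (m - big_pow3 m ^ 3) (by omega) (by omega),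
          ih fuel₂' (big_pow3 m ^ 3 - 1) (by omega) (by omega)]

-- one unfolding of A's f at a non-base argument
theorem f_step (m : Int) (hm : ¬ m < 8) :
    f m = (if pyLexLt [PySem.List.pyGetD (f (m - big_pow3 m ^ 3)) 0 0 + 1,
                       PySem.List.pyGetD (f (m - big_pow3 m ^ 3)) 1 0 + big_pow3 m ^ 3]
              (f (big_pow3 m ^ 3 - 1))
           then f (big_pow3 m ^ 3 - 1)
           else [PySem.List.pyGetD (f (m - big_pow3 m ^ 3)) 0 0 + 1,
                 PySem.List.pyGetD (f (m - big_pow3 m ^ 3)) 1 0 + big_pow3 m ^ 3]) := by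
  obtain ⟨ha2, ha3⟩ := big_pow3_ge_two m (by omega)
  have h8a : (2:Int) ^ 3 ≤ big_pow3 m ^ 3 := pow_le_pow_left₀ (by norm_num) ha2 3
  norm_num at h8a
  show fLoop (m.toNat + 1) m = _
  simp only [fLoop, if_neg hm]
  unfold f
  rw [fLoop_irrel m.toNat ((m - big_pow3 m ^ 3).toNat + 1) (m - big_pow3 m ^ 3)
        (by omega) (by omega),
      fLoop_irrel m.toNat ((big_pow3 m ^ 3 - 1).toNat + 1) (big_pow3 m ^ 3 - 1)
        (by omega) (by omega)]

theorem go_correct : ∀ (fuel : Nat), ∀ (m : Int), m.toNat < fuel → m ≤ 2147483648 →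
    ∀ memo : PySem.Dict Int (List Int),
    (∀ k v, memo.get? k = some v → v = f k) →
    (goLoop fuel m memo).1 = f m ∧
      (∀ k v, (goLoop fuel m memo).2.get? k = some v → v = f k) := by
  intro fuel
  induction fuel with
  | zero => intro m h1 _ memo _; omega
  | succ fuel ih =>
    intro m hfu hub memo hinv
    by_cases hm : m < 8
    · simp only [goLoop, if_pos hm]
      constructor
      · show [m, m] = f m
        show [m, m] = fLoop (m.toNat + 1) m
        simp only [fLoop, if_pos hm]
      · exact hinv
    · simp only [goLoop, if_neg hm]
      cases hmem : memo.get? m with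
      | some v =>
        simp only
        exact ⟨hinv m v hmem, hinv⟩
      | none =>
        simp only
        have h8 : (8:Int) ≤ m := by omega
        obtain ⟨ha2, ha3⟩ := icbrt_ge_two m h8
        have h8a : (2:Int) ^ 3 ≤ icbrtLoop m 0 ^ 3 := pow_le_pow_left₀ (by norm_num) ha2 3
        norm_num at h8a
        have IH1 := ih (m - icbrtLoop m 0 ^ 3) (by omega) (by omega) memo hinv
        have IH2 := ih (icbrtLoop m 0 ^ 3 - 1) (by omega) (by omega) _ IH1.2
        have hfm : f m =
            (if pyLexLt [PySem.List.pyGetD (f (m - icbrtLoop m 0 ^ 3)) 0 0 + 1,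
                          PySem.List.pyGetD (f (m - icbrtLoop m 0 ^ 3)) 1 0 + icbrtLoop m 0 ^ 3]
                (f (icbrtLoop m 0 ^ 3 - 1))
             then f (icbrtLoop m 0 ^ 3 - 1)
             else [PySem.List.pyGetD (f (m - icbrtLoop m 0 ^ 3)) 0 0 + 1,
                   PySem.List.pyGetD (f (m - icbrtLoop m 0 ^ 3)) 1 0 + icbrtLoop m 0 ^ 3]) := by
          rw [f_step m hm, icbrt_eq_bp3 m h8 hub]
        rw [IH1.1, IH2.1, ← hfm]
        refine ⟨rfl, ?_⟩
        intro k v hkv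
        rw [PySem.Dict.get?_insert] at hkv
        by_cases hk : k = m
        · rw [if_pos hk] at hkv
          cases hkv; exact hk ▸ rfl
        · rw [if_neg hk] at hkv
          exact IH2.2 k v hkv

-- ===== VERDICT (by name: the statement is the Claim_ definition above) =====
theorem f_spec : Claim_equal_f := by
  intro n hdom
  unfold Spec_f f_alt
  by_cases hn : n < 8
  · rw [if_pos hn]
    show fLoop (n.toNat + 1) n = _
    simp only [fLoop, if_pos hn]
  · rw [if_neg hn]
    have hub : n ≤ 2147483648 := by
      unfold Dom_f pvDomInt at hdom; simp at hdom; omega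
    exact (go_correct (n.toNat + 1) n (by omega) hub PySem.Dict.empty
      (by intro k v h; simp [PySem.Dict.get?_empty] at h)).1.symm
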